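-- pv_equiv track=rewrite | github.com/matyaslagos/analogical-path-model | ecgpack/ecg.py | ctxt_dy2
-- ===== SOURCE A (Python) =====
-- def ctxt_dy2(train):
--     # TODO: add comments for lines
--     """Return bigram context dictionary from training data.
--
--     Computes the "context dictionary" of each word in `train`. This dictionary
--     maps each word to its left and right context dictionaries: the left context
--     dictionary consists of pairs (left neighbor, freq), where `left neighbor`
--     is a word that occurs in `train` directly before the word, and `freq` is
--     the number of times these two words co-occur in this order; the right
--     context dictionary is the same but for right neighbors.
--     > E.g. if `cdy` is a context dictionary, then cdy['king']['left']['the']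
--     is 14 if the bigram ('the', 'king') occurs 14 times in the sentences
--     of `train`.
--
--     Keyword arguments:
--     train -- list of lists of words (output of `txt_to_list()` or of
--         `list_to_train_test()[0]`)
--
--     Returns:
--     dict -- `cdy`, where cdy['king']['left']['the'] is 14 if the bigram
--         ('the', 'king') occurs 14 times in the sentences of `train`, and
--         cdy['king']['right']['was'] is 18 if the bigram ('king', 'was') occurs
--         18 times in the sentences of `train`
--     """
--     vocab = {word for sentence in train for word in sentence}
--     vocab = vocab.union({'<s>', '</s>'})
--     cdy = {word: {'left':{}, 'right':{}} for word in vocab}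
--     for sentence in train:
--         padded = ['<s>'] + sentence + ['</s>']
--         bigrams = zip(padded[:-1], padded[1:])
--         for first, second in bigrams:
--             try:
--                 cdy[first]['right'][second] += 1
--             except KeyError:
--                 cdy[first]['right'][second] = 1
--             try:
--                 cdy[second]['left'][first] += 1
--             except KeyError:
--                 cdy[second]['left'][first] = 1
--     return cdy
-- ===== SOURCE B (Python) =====
-- def ctxt_dy2(train):
--     """Count each padded bigram once in a flat counter, then distribute the
--     final counts into the per-word left/right context dictionaries."""
--     vocab = {word for sentence in train for word in sentence}
--     vocab = vocab.union({'<s>', '</s>'})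
--     counts = {}
--     for sentence in train:
--         padded = ['<s>'] + sentence + ['</s>']
--         for bigram in zip(padded[:-1], padded[1:]):
--             counts[bigram] = counts.get(bigram, 0) + 1
--     cdy = {word: {'left': {}, 'right': {}} for word in vocab}
--     for (first, second), freq in counts.items():
--         cdy[first]['right'][second] = freq
--         cdy[second]['left'][first] = freq
--     return cdy
-- ===== Notes on version B (the rewrite author's own statement) =====
-- stated objective: alternative
-- what changed: A increments two nested context dicts on every bigram occurrence; B counts all padded bigrams once in a flat counter and then distributes each final count into the left and right context tables in one pass over the distinct bigrams.
import Mathlib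
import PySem

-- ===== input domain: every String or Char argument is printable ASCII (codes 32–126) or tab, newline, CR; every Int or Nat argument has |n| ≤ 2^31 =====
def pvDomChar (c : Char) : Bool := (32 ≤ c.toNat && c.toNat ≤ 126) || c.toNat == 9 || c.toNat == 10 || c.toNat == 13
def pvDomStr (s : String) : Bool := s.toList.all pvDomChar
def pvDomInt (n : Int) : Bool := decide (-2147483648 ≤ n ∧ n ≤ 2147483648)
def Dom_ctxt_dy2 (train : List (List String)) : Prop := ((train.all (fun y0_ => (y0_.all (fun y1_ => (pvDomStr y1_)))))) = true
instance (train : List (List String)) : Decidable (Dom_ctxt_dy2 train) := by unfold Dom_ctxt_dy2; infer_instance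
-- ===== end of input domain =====

-- B replaces A's per-occurrence double increment into the nested dict by counting all padded
-- bigrams once in a flat counter and then distributing the final counts (objective: alternative).
-- Python dict/set iteration orders are modelled by PySem's insertion-order Dict / first-insertion Set.

-- ===== PORT A =====
def ctxt_dy2 (train : List (List String)) : List (String × List (String × List (String × Int))) :=
  let vocab : PySem.Set String := PySem.Set.ofList (train.flatMap (fun sentence => sentence))
  let vocab : PySem.Set String := PySem.Set.union vocab (PySem.Set.ofList ["<s>", "</s>"])
  let cdy0 : PySem.Dict String (PySem.Dict String (PySem.Dict String Int)) :=
    PySem.Dict.mk (vocab.map (fun word =>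
      (word, PySem.Dict.mk [("left", PySem.Dict.empty), ("right", PySem.Dict.empty)])))
  let cdy := train.foldl (fun cdy sentence =>
    let padded := "<s>" :: sentence ++ ["</s>"]
    let bigrams := (PySem.List.slice padded none (some (-1))).zip (PySem.List.slice padded (some 1) none)
    bigrams.foldl (fun cdy fs =>
      -- try: cdy[first]['right'][second] += 1 except KeyError: … = 1  (= modify with default 0)
      let cdy := cdy.modify fs.1 PySem.Dict.empty (fun m =>
        m.modify "right" PySem.Dict.empty (fun r => r.modify fs.2 0 (· + 1)))
      cdy.modify fs.2 PySem.Dict.empty (fun m =>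
        m.modify "left" PySem.Dict.empty (fun l => l.modify fs.1 0 (· + 1)))) cdy) cdy0
  cdy.items.map (fun p => (p.1, p.2.items.map (fun q => (q.1, q.2.items))))

-- ===== PORT B =====
def ctxt_dy2_alt (train : List (List String)) : List (String × List (String × List (String × Int))) :=
  let vocab : PySem.Set String := PySem.Set.ofList (train.flatMap (fun sentence => sentence))
  let vocab : PySem.Set String := PySem.Set.union vocab (PySem.Set.ofList ["<s>", "</s>"])
  let counts : PySem.Dict (String × String) Int := train.foldl (fun counts sentence =>
    let padded := "<s>" :: sentence ++ ["</s>"]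
    let bigrams := (PySem.List.slice padded none (some (-1))).zip (PySem.List.slice padded (some 1) none)
    bigrams.foldl (fun c bg => c.insert bg (c.getD bg 0 + 1)) counts) PySem.Dict.empty
  let cdy0 : PySem.Dict String (PySem.Dict String (PySem.Dict String Int)) :=
    PySem.Dict.mk (vocab.map (fun word =>
      (word, PySem.Dict.mk [("left", PySem.Dict.empty), ("right", PySem.Dict.empty)])))
  let cdy := counts.items.foldl (fun cdy it =>
    let cdy := cdy.modify it.1.1 PySem.Dict.empty (fun m =>
      m.modify "right" PySem.Dict.empty (fun r => r.insert it.1.2 it.2))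
    cdy.modify it.1.2 PySem.Dict.empty (fun m =>
      m.modify "left" PySem.Dict.empty (fun l => l.insert it.1.1 it.2))) cdy0
  cdy.items.map (fun p => (p.1, p.2.items.map (fun q => (q.1, q.2.items))))

-- ===== PRECONDITION & SPEC =====
def Spec_ctxt_dy2 (train : List (List String)) (out : List (String × List (String × List (String × Int)))) : Prop := out = ctxt_dy2_alt train
instance (train : List (List String)) (out : List (String × List (String × List (String × Int)))) : Decidable (Spec_ctxt_dy2 train out) := by unfold Spec_ctxt_dy2; infer_instance

-- ===== CLAIM (what is proved, stated in full; the proofs are below) =====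
def Claim_equal_ctxt_dy2 : Prop := ∀ (train : List (List String)), Dom_ctxt_dy2 train → Spec_ctxt_dy2 train (ctxt_dy2 train)

-- ===== LEMMAS AND PROOFS =====

lemma pv_getD_mk_map {μ : Type} (vocab : List String) (f : String → μ) (k : String) (hk : k ∈ vocab) (dflt : μ) :
    (PySem.Dict.mk (vocab.map (fun w => (w, f w)))).getD k dflt = f k := by
  induction vocab with
  | nil => simp at hk
  | cons w ws ih =>
    simp only [List.map_cons]
    by_cases hw : w = k
    · subst hw; simp [PySem.Dict.getD, PySem.Dict.get?]
    · rcases List.mem_cons.mp hk with h | h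
      · exact absurd h.symm hw
      · have := ih h
        simpa [PySem.Dict.getD, PySem.Dict.get?, List.find?_cons, hw] using this

lemma pv_modify_mk_map {μ : Type} (vocab : List String) (f : String → μ) (k : String) (hk : k ∈ vocab)
    (dflt : μ) (g : μ → μ) :
    (PySem.Dict.mk (vocab.map (fun w => (w, f w)))).modify k dflt g
      = PySem.Dict.mk (vocab.map (fun w => (w, if w = k then g (f w) else f w))) := by
  have hc : (PySem.Dict.mk (vocab.map (fun w => (w, f w)))).contains k = true := by
    simp only [PySem.Dict.contains, List.any_eq_true]
    exact ⟨(k, f k), List.mem_map.mpr ⟨k, hk, rfl⟩, by simp⟩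
  simp only [PySem.Dict.modify, pv_getD_mk_map vocab f k hk, PySem.Dict.insert, hc, if_true]
  congr 1
  rw [List.map_map]
  apply List.map_congr_left
  intro w hw
  by_cases hwk : w = k
  · subst hwk; simp
  · simp [hwk]

lemma pv_mid_modify_right (a b : PySem.Dict String Int) (dflt : PySem.Dict String Int) (g : PySem.Dict String Int → PySem.Dict String Int) :
    (PySem.Dict.mk [("left", a), ("right", b)]).modify "right" dflt g
      = PySem.Dict.mk [("left", a), ("right", g b)] := by rfl

lemma pv_mid_modify_left (a b : PySem.Dict String Int) (dflt : PySem.Dict String Int) (g : PySem.Dict String Int → PySem.Dict String Int) :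
    (PySem.Dict.mk [("left", a), ("right", b)]).modify "left" dflt g
      = PySem.Dict.mk [("left", g a), ("right", b)] := by rfl

def pvAsm (vocab : List String) (F G : String → PySem.Dict String Int) :
    PySem.Dict String (PySem.Dict String (PySem.Dict String Int)) :=
  PySem.Dict.mk (vocab.map (fun w => (w, PySem.Dict.mk [("left", F w), ("right", G w)])))

def pvStepA (cdy : PySem.Dict String (PySem.Dict String (PySem.Dict String Int))) (fs : String × String) :
    PySem.Dict String (PySem.Dict String (PySem.Dict String Int)) :=
  let cdy := cdy.modify fs.1 PySem.Dict.empty (fun m =>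
    m.modify "right" PySem.Dict.empty (fun r => r.modify fs.2 0 (· + 1)))
  cdy.modify fs.2 PySem.Dict.empty (fun m =>
    m.modify "left" PySem.Dict.empty (fun l => l.modify fs.1 0 (· + 1)))

lemma pv_stepA_asm (vocab : List String) (F G : String → PySem.Dict String Int) (fs : String × String)
    (h1 : fs.1 ∈ vocab) (h2 : fs.2 ∈ vocab) :
    pvStepA (pvAsm vocab F G) fs
      = pvAsm vocab (fun w => if w = fs.2 then (F w).modify fs.1 0 (· + 1) else F w)
                    (fun w => if w = fs.1 then (G w).modify fs.2 0 (· + 1) else G w) := by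
  unfold pvStepA pvAsm
  rw [pv_modify_mk_map vocab _ fs.1 h1]
  rw [pv_modify_mk_map vocab _ fs.2 h2]
  congr 1
  apply List.map_congr_left
  intro w hw
  by_cases e2 : w = fs.2 <;> by_cases e1 : w = fs.1 <;>
    simp [e1, e2, pv_mid_modify_right, pv_mid_modify_left] <;>
    split_ifs <;> simp_all [pv_mid_modify_left]

def pvStepB (cdy : PySem.Dict String (PySem.Dict String (PySem.Dict String Int))) (it : (String × String) × Int) :
    PySem.Dict String (PySem.Dict String (PySem.Dict String Int)) :=
  let cdy := cdy.modify it.1.1 PySem.Dict.empty (fun m =>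
    m.modify "right" PySem.Dict.empty (fun r => r.insert it.1.2 it.2))
  cdy.modify it.1.2 PySem.Dict.empty (fun m =>
    m.modify "left" PySem.Dict.empty (fun l => l.insert it.1.1 it.2))

lemma pv_stepB_asm (vocab : List String) (F G : String → PySem.Dict String Int) (it : (String × String) × Int)
    (h1 : it.1.1 ∈ vocab) (h2 : it.1.2 ∈ vocab) :
    pvStepB (pvAsm vocab F G) it
      = pvAsm vocab (fun w => if w = it.1.2 then (F w).insert it.1.1 it.2 else F w)
                    (fun w => if w = it.1.1 then (G w).insert it.1.2 it.2 else G w) := by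
  unfold pvStepB pvAsm
  rw [pv_modify_mk_map vocab _ it.1.1 h1]
  rw [pv_modify_mk_map vocab _ it.1.2 h2]
  congr 1
  apply List.map_congr_left
  intro w hw
  by_cases e2 : w = it.1.2 <;> by_cases e1 : w = it.1.1 <;>
    simp [e1, e2, pv_mid_modify_right, pv_mid_modify_left] <;>
    split_ifs <;> simp_all [pv_mid_modify_left]

lemma pv_foldA_char (bs : List (String × String)) (vocab : List String)
    (hmem : ∀ bg ∈ bs, bg.1 ∈ vocab ∧ bg.2 ∈ vocab) (F G : String → PySem.Dict String Int) :
    bs.foldl pvStepA (pvAsm vocab F G)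
      = pvAsm vocab
          (fun w => (((bs.filter (fun p => p.2 == w)).map (fun p => p.1)).foldl (fun d x => d.modify x 0 (· + 1)) (F w)))
          (fun w => (((bs.filter (fun p => p.1 == w)).map (fun p => p.2)).foldl (fun d x => d.modify x 0 (· + 1)) (G w))) := by
  induction bs generalizing F G with
  | nil => simp
  | cons fs rest ih =>
    obtain ⟨h1, h2⟩ := hmem fs (by simp)
    rw [List.foldl_cons, pv_stepA_asm vocab F G fs h1 h2,
        ih (fun bg hbg => hmem bg (List.mem_cons_of_mem _ hbg))]
    unfold pvAsm
    congr 1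
    apply List.map_congr_left
    intro w hw
    have c2 : (fs.2 == w) = (decide (w = fs.2)) := by
      by_cases h : w = fs.2
      · subst h; simp
      · have h' : ¬ fs.2 = w := fun hh => h hh.symm
        simp [h, h']
    have c1 : (fs.1 == w) = (decide (w = fs.1)) := by
      by_cases h : w = fs.1
      · subst h; simp
      · have h' : ¬ fs.1 = w := fun hh => h hh.symm
        simp [h, h']
    by_cases e2 : w = fs.2 <;> by_cases e1 : w = fs.1 <;>
      simp [List.filter_cons, c1, c2, e1, e2] <;>
      split_ifs with h <;> first | rfl | (exfalso; exact h (e1 ▸ e2 ▸ rfl)) | (exfalso; exact h (e2 ▸ e1 ▸ rfl)) | simp_all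

lemma pv_foldB_char (C : List ((String × String) × Int)) (vocab : List String)
    (hmem : ∀ q ∈ C, q.1.1 ∈ vocab ∧ q.1.2 ∈ vocab)
    (hnd : (C.map (fun q => q.1)).Nodup)
    (F G : String → PySem.Dict String Int)
    (hfresh : ∀ q ∈ C, (F q.1.2).contains q.1.1 = false ∧ (G q.1.1).contains q.1.2 = false) :
    C.foldl pvStepB (pvAsm vocab F G)
      = pvAsm vocab
          (fun w => PySem.Dict.mk ((F w).items ++ (C.filter (fun q => q.1.2 == w)).map (fun q => (q.1.1, q.2))))
          (fun w => PySem.Dict.mk ((G w).items ++ (C.filter (fun q => q.1.1 == w)).map (fun q => (q.1.2, q.2)))) := by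
  induction C generalizing F G with
  | nil => simp [pvAsm]
  | cons q C' ih =>
    obtain ⟨h1, h2⟩ := hmem q (by simp)
    obtain ⟨hf1, hf2⟩ := hfresh q (by simp)
    have hq1 : q.1 ∉ C'.map (fun q => q.1) := (List.nodup_cons.mp hnd).1
    rw [List.foldl_cons, pv_stepB_asm vocab F G q h1 h2]
    rw [ih (fun q' hq' => hmem q' (List.mem_cons_of_mem _ hq'))
          (List.nodup_cons.mp hnd).2 _ _
          ?_]
    · unfold pvAsm
      congr 1
      apply List.map_congr_left
      intro w hw
      have c2 : (q.1.2 == w) = (decide (w = q.1.2)) := by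
        by_cases h : w = q.1.2
        · subst h; simp
        · have h' : ¬ q.1.2 = w := fun hh => h hh.symm
          simp [h, h']
      have c1 : (q.1.1 == w) = (decide (w = q.1.1)) := by
        by_cases h : w = q.1.1
        · subst h; simp
        · have h' : ¬ q.1.1 = w := fun hh => h hh.symm
          simp [h, h']
      by_cases e2 : w = q.1.2 <;> by_cases e1 : w = q.1.1
      · have e12 : q.1.2 = q.1.1 := by rw [← e2]; exact e1
        have hf1' := hf1; rw [e12] at hf1'
        have hf2' := hf2; rw [e12] at hf2'
        simp [e1, e2, e12,
              PySem.Dict.items_insert_of_not_contains _ _ hf1',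
              PySem.Dict.items_insert_of_not_contains _ _ hf2']
      · have hsf : ¬ q.1.2 = q.1.1 := fun hh => e1 (e2.trans hh)
        have hfs : ¬ q.1.1 = q.1.2 := fun hh => hsf hh.symm
        simp [c2, e1, e2, hsf, hfs,
              PySem.Dict.items_insert_of_not_contains _ _ hf1]
      · have hfs : ¬ q.1.1 = q.1.2 := fun hh => e2 (e1.trans hh)
        have hsf : ¬ q.1.2 = q.1.1 := fun hh => hfs hh.symm
        simp [c1, e1, e2, hsf, hfs,
              PySem.Dict.items_insert_of_not_contains _ _ hf2]
      · simp [c1, c2, e1, e2]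
    · -- freshness is preserved
      intro q' hq'
      obtain ⟨g1, g2⟩ := hfresh q' (List.mem_cons_of_mem _ hq')
      have hne : q'.1 ≠ q.1 := by
        intro hh; exact hq1 (hh ▸ List.mem_map.mpr ⟨q', hq', rfl⟩)
      constructor
      · by_cases e : q'.1.2 = q.1.2
        · have hne1 : q'.1.1 ≠ q.1.1 := by
            intro hh; exact hne (Prod.ext hh e)
          rw [e] at g1
          simp [e, PySem.Dict.contains_insert, g1, hne1]
        · simp [e, g1]
      · by_cases e : q'.1.1 = q.1.1
        · have hne2 : q'.1.2 ≠ q.1.2 := by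
            intro hh; exact hne (Prod.ext e hh)
          rw [e] at g2
          simp [e, PySem.Dict.contains_insert, g2, hne2]
        · simp [e, g2]

lemma pv_ofList_map_filter {α β : Type} [BEq α] [LawfulBEq α] [BEq β] [LawfulBEq β]
    [BEq (α × β)] [LawfulBEq (α × β)]
    (l : List (α × β)) (p : α × β → Bool) (f : α × β → β)
    (hinj : ∀ x y, p x = true → p y = true → f x = f y → x = y) :
    PySem.Set.ofList ((l.filter p).map f) = ((PySem.Set.ofList l).filter p).map f := by
  induction l using List.reverseRecOn with
  | nil => rfl
  | append_singleton l x ih =>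
    rw [List.filter_append, List.map_append, PySem.Set.ofList_append_singleton]
    by_cases px : p x = true
    · simp only [List.filter_cons, px, if_true, List.filter_nil, List.map_cons, List.map_nil,
        PySem.Set.ofList_append_singleton]
      by_cases hmem : x ∈ PySem.Set.ofList l
      · have hfx : f x ∈ PySem.Set.ofList ((l.filter p).map f) := by
          rw [PySem.Set.mem_ofList]
          exact List.mem_map.mpr ⟨x, List.mem_filter.mpr ⟨(PySem.Set.mem_ofList _ _).mp hmem, px⟩, rfl⟩
        rw [PySem.Set.add_of_mem hfx, PySem.Set.add_of_mem hmem, ih]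
      · have hxl : x ∉ l := fun h => hmem ((PySem.Set.mem_ofList _ _).mpr h)
        have hfx : f x ∉ PySem.Set.ofList ((l.filter p).map f) := by
          intro h
          rw [PySem.Set.mem_ofList] at h
          obtain ⟨y, hy, hfy⟩ := List.mem_map.mp h
          obtain ⟨hyl, hpy⟩ := List.mem_filter.mp hy
          exact hxl ((hinj y x hpy px hfy) ▸ hyl)
        rw [PySem.Set.add_of_not_mem hfx, PySem.Set.add_of_not_mem hmem,
            List.filter_append, List.map_append, ih]
        simp [px]
    · have px' : p x = false := by simpa using px
      simp only [List.filter_cons, px', Bool.false_eq_true, if_false, List.filter_nil,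
        List.map_nil, List.append_nil]
      by_cases hmem : x ∈ PySem.Set.ofList l
      · rw [PySem.Set.add_of_mem hmem, ih]
      · rw [PySem.Set.add_of_not_mem hmem, List.filter_append, ih]
        simp [px']

lemma pv_count_map_filter {α β : Type} [BEq α] [LawfulBEq α] [BEq β] [LawfulBEq β]
    [BEq (α × β)] [LawfulBEq (α × β)]
    (l : List (α × β)) (p : α × β → Bool) (f : α × β → β) (x : α × β) (hpx : p x = true)
    (hinj : ∀ x y, p x = true → p y = true → f x = f y → x = y) :
    ((l.filter p).map f).count (f x) = l.count x := by
  induction l with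
  | nil => rfl
  | cons y rest ih =>
    by_cases py : p y = true
    · have : (f y == f x) = (y == x) := by
        by_cases hyx : y = x
        · simp [hyx]
        · have : ¬ f y = f x := fun h => hyx (hinj y x py hpx h)
          simp [hyx, this]
      simp [py, List.count_cons, ih]
      rw [this]
    · have py' : p y = false := by simpa using py
      have hyx : (y == x) = false := by
        by_cases h : y = x
        · rw [h] at py'; rw [py'] at hpx; exact absurd hpx (by simp)
        · simp [h]
      simp [List.filter_cons, py', List.count_cons, hyx, ih]

def pvBig (sentence : List String) : List (String × String) :=
  let padded := "<s>" :: sentence ++ ["</s>"]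
  (PySem.List.slice padded none (some (-1))).zip (PySem.List.slice padded (some 1) none)

def pvVocab (train : List (List String)) : List String :=
  PySem.Set.union (PySem.Set.ofList (train.flatMap (fun sentence => sentence))) (PySem.Set.ofList ["<s>", "</s>"])

lemma pv_mem_slice {α : Type} {xs : List α} {a b : Option Int} {x : α}
    (h : x ∈ PySem.List.slice xs a b) : x ∈ xs := by
  simp only [PySem.List.slice] at h
  exact List.mem_of_mem_drop (List.mem_of_mem_take h)

lemma pv_big_mem (train : List (List String)) :
    ∀ bg ∈ train.flatMap pvBig, bg.1 ∈ pvVocab train ∧ bg.2 ∈ pvVocab train := by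
  intro bg hbg
  obtain ⟨s, hs, hbgs⟩ := List.mem_flatMap.mp hbg
  obtain ⟨a, b⟩ := bg
  unfold pvBig at hbgs
  obtain ⟨h1, h2⟩ := List.of_mem_zip hbgs
  have hpad : ∀ x, x ∈ "<s>" :: s ++ ["</s>"] → x ∈ pvVocab train := by
    intro x hx
    unfold pvVocab
    rw [PySem.Set.mem_union]
    rcases List.mem_cons.mp hx with h | h
    · subst h; right; rw [PySem.Set.mem_ofList]; exact List.mem_cons_self ..
    · rcases List.mem_append.mp h with h | h
      · left; rw [PySem.Set.mem_ofList]
        exact List.mem_flatMap.mpr ⟨s, hs, h⟩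
      · have hx2 : x = "</s>" := by simpa using h
        subst hx2; right; rw [PySem.Set.mem_ofList]; simp
  exact ⟨hpad a (pv_mem_slice h1), hpad b (pv_mem_slice h2)⟩

lemma pv_states_eq (train : List (List String)) :
    (train.flatMap pvBig).foldl pvStepA (pvAsm (pvVocab train) (fun _ => PySem.Dict.empty) (fun _ => PySem.Dict.empty))
      = (PySem.Dict.counter (train.flatMap pvBig)).items.foldl pvStepB
          (pvAsm (pvVocab train) (fun _ => PySem.Dict.empty) (fun _ => PySem.Dict.empty)) := by
  set allB := train.flatMap pvBig with hallB
  have hmemA := pv_big_mem train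
  rw [pv_foldA_char allB (pvVocab train) hmemA]
  rw [PySem.Dict.items_counter]
  have hCmap : ((PySem.Set.ofList allB).map (fun k => (k, (allB.count k : Int)))).map (fun q => q.1)
      = PySem.Set.ofList allB := by
    rw [List.map_map]
    exact List.map_congr_left (fun k _ => rfl) |>.trans (List.map_id _)
  rw [pv_foldB_char _ (pvVocab train)
        (fun q hq => by
          obtain ⟨k, hk, hkq⟩ := List.mem_map.mp hq
          subst hkq
          exact hmemA k ((PySem.Set.mem_ofList _ _).mp hk))
        (by rw [hCmap]; exact PySem.Set.nodup_ofList _)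
        _ _
        (fun q hq => ⟨rfl, rfl⟩)]
  unfold pvAsm
  congr 1
  apply List.map_congr_left
  intro w hw
  have hinj2 : ∀ (x y : String × String), (x.1 == w) = true → (y.1 == w) = true → x.2 = y.2 → x = y := by
    intro x y hx hy hxy
    exact Prod.ext ((beq_iff_eq.mp hx).trans (beq_iff_eq.mp hy).symm) hxy
  have hinj1 : ∀ (x y : String × String), (x.2 == w) = true → (y.2 == w) = true → x.1 = y.1 → x = y := by
    intro x y hx hy hxy
    exact Prod.ext hxy ((beq_iff_eq.mp hx).trans (beq_iff_eq.mp hy).symm)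
  have hL : (List.foldl (fun d x => d.modify x 0 fun x => x + 1) PySem.Dict.empty
        (List.map (fun p => p.1) (List.filter (fun p => p.2 == w) allB)))
      = PySem.Dict.mk (PySem.Dict.empty.items ++
          (List.filter (fun q => q.1.2 == w)
            (List.map (fun k => (k, (allB.count k : Int))) (PySem.Set.ofList allB))).map
            (fun q => (q.1.1, q.2))) := by
    rw [← PySem.Dict.counter_eq_foldl]
    apply PySem.Dict.ext
    rw [PySem.Dict.items_counter]
    show _ = [] ++ _
    rw [List.nil_append, List.filter_map, List.map_map]
    rw [pv_ofList_map_filter _ _ _ hinj1, List.map_map]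
    apply List.map_congr_left
    intro q hq
    obtain ⟨hql, hqp⟩ := List.mem_filter.mp hq
    simp only [Function.comp]
    congr 1
    exact_mod_cast pv_count_map_filter allB _ _ q hqp hinj1
  have hR : (List.foldl (fun d x => d.modify x 0 fun x => x + 1) PySem.Dict.empty
        (List.map (fun p => p.2) (List.filter (fun p => p.1 == w) allB)))
      = PySem.Dict.mk (PySem.Dict.empty.items ++
          (List.filter (fun q => q.1.1 == w)
            (List.map (fun k => (k, (allB.count k : Int))) (PySem.Set.ofList allB))).map
            (fun q => (q.1.2, q.2))) := by
    rw [← PySem.Dict.counter_eq_foldl]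
    apply PySem.Dict.ext
    rw [PySem.Dict.items_counter]
    show _ = [] ++ _
    rw [List.nil_append, List.filter_map, List.map_map]
    rw [pv_ofList_map_filter _ _ _ hinj2, List.map_map]
    apply List.map_congr_left
    intro q hq
    obtain ⟨hql, hqp⟩ := List.mem_filter.mp hq
    simp only [Function.comp]
    congr 1
    exact_mod_cast pv_count_map_filter allB _ _ q hqp hinj2
  simp only [hL, hR]

-- ===== VERDICT (by name: the statement is the Claim_ definition above) =====
theorem ctxt_dy2_spec : Claim_equal_ctxt_dy2 := by
  intro train _
  show ctxt_dy2 train = ctxt_dy2_alt train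
  have hA : ctxt_dy2 train
      = ((train.flatMap pvBig).foldl pvStepA
          (pvAsm (pvVocab train) (fun _ => PySem.Dict.empty) (fun _ => PySem.Dict.empty))).items.map
          (fun p => (p.1, p.2.items.map (fun q => (q.1, q.2.items)))) := by
    show ((train.foldl (fun cdy sentence => (pvBig sentence).foldl pvStepA cdy)
          (pvAsm (pvVocab train) (fun _ => PySem.Dict.empty) (fun _ => PySem.Dict.empty))).items.map
          (fun p => (p.1, p.2.items.map (fun q => (q.1, q.2.items))))) = _
    rw [List.foldl_flatMap]
  have hB : ctxt_dy2_alt train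
      = ((PySem.Dict.counter (train.flatMap pvBig)).items.foldl pvStepB
          (pvAsm (pvVocab train) (fun _ => PySem.Dict.empty) (fun _ => PySem.Dict.empty))).items.map
          (fun p => (p.1, p.2.items.map (fun q => (q.1, q.2.items)))) := by
    show (((train.foldl (fun c sentence => (pvBig sentence).foldl (fun c bg => c.insert bg (c.getD bg 0 + 1)) c)
            PySem.Dict.empty).items.foldl pvStepB
          (pvAsm (pvVocab train) (fun _ => PySem.Dict.empty) (fun _ => PySem.Dict.empty))).items.map
          (fun p => (p.1, p.2.items.map (fun q => (q.1, q.2.items))))) = _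
    rw [← List.foldl_flatMap, PySem.Dict.foldl_insert_getD_add_one_eq_counter]
  rw [hA, hB, pv_states_eq]
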